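-- pv_equiv track=rewrite | github.com/harikrishnaalvala/python-idp-set-4 | the richest person/index.py | get_richest_person
-- ===== SOURCE A (Python) =====
-- def get_richest_person(persons):
--     max_income=max(persons.values())
--     richest_persons=[]
--     for i in persons.keys():
--         if (persons[i]==max_income):
--             richest_persons.append(i)
--     richest_persons.sort()
--     return richest_persons[0]
-- ===== SOURCE B (Python) =====
-- def get_richest_person(persons):
--     it = iter(persons.items())
--     best_key, best_income = next(it)
--     for k, v in it:
--         if v > best_income or (v == best_income and k < best_key):
--             best_key, best_income = k, v
--     return best_key
-- ===== Notes on version B (the rewrite author's own statement) =====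
-- stated objective: simpler
-- what changed: Replaced the three-phase max/filter/sort pipeline with a single pass over items() keeping the best (income, key) accumulator; strict > on income and < on key reproduce the lexicographically-smallest-maximal tie-break.
import Mathlib
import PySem

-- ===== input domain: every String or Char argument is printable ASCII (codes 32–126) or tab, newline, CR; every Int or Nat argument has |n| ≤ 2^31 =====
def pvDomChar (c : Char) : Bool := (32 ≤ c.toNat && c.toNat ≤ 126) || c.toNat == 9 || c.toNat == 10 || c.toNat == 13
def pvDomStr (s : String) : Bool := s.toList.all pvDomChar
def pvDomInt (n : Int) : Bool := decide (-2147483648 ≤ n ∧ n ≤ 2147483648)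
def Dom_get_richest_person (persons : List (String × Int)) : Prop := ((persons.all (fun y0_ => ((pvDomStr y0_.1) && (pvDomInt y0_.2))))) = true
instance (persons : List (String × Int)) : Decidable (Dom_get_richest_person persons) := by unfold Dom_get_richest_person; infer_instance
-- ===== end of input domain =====

-- B replaces A's max-pass + filter-pass + sort by ONE pass keeping the best (income, key) accumulator (objective: simpler).

-- ===== PORT A =====
def get_richest_person (persons : List (String × Int)) : String :=
  match PySem.List.max? (PySem.Dict.values (PySem.Dict.mk persons)) (fun x => x) with
  | none => ""          -- max() on an empty dict raises ValueError: excluded by Pre_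
  | some max_income =>
    let richest_persons : List String :=
      (PySem.Dict.keys (PySem.Dict.mk persons)).foldl
        (fun acc i =>
          if PySem.Dict.get? (PySem.Dict.mk persons) i = some max_income then acc ++ [i] else acc) []
    match PySem.List.pyGet? (PySem.List.sorted richest_persons (fun x => x) false) 0 with
    | none => ""        -- unreachable when persons ≠ []
    | some s => s

-- ===== PORT B =====
def get_richest_person_alt (persons : List (String × Int)) : String :=
  match persons with
  | [] => ""            -- next(it) on an empty dict raises StopIteration: excluded by Pre_
  | p :: rest =>
      (rest.foldl (fun best q =>
        if best.2 < q.2 ∨ (q.2 = best.2 ∧ q.1 < best.1) then q else best) p).1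

-- ===== PRECONDITION & SPEC =====
-- Pre_ excludes the empty dict (A raises ValueError there) and association lists with duplicate
-- keys, which cannot arise from a Python dict (the List (String × Int) encodes dict items).
def Pre_get_richest_person (persons : List (String × Int)) : Prop :=
  persons ≠ [] ∧ (persons.map Prod.fst).Nodup
instance (persons : List (String × Int)) : Decidable (Pre_get_richest_person persons) := by
  unfold Pre_get_richest_person; infer_instance

def pvWitness_get_richest_person : (List (String × Int)) := [("alice", 3), ("bob", 3)]

def Spec_get_richest_person (persons : List (String × Int)) (out : String) : Prop := out = get_richest_person_alt persons
instance (persons : List (String × Int)) (out : String) : Decidable (Spec_get_richest_person persons out) := by unfold Spec_get_richest_person; infer_instance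

-- ===== CLAIM (what is proved, stated in full; the proofs are below) =====
def Claim_equal_get_richest_person : Prop := ∀ (persons : List (String × Int)), Dom_get_richest_person persons → Pre_get_richest_person persons → Spec_get_richest_person persons (get_richest_person persons)

-- ===== LEMMAS AND PROOFS =====

-- B's running-best fold: its result is an element, its income is maximal, and among
-- maximal-income elements its key is minimal.
lemma foldl_best_spec (rest : List (String × Int)) (p : String × Int) :
    (rest.foldl (fun best q =>
        if best.2 < q.2 ∨ (q.2 = best.2 ∧ q.1 < best.1) then q else best) p) ∈ p :: rest ∧
    (∀ x ∈ p :: rest, x.2 ≤ (rest.foldl (fun best q =>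
        if best.2 < q.2 ∨ (q.2 = best.2 ∧ q.1 < best.1) then q else best) p).2) ∧
    (∀ x ∈ p :: rest, x.2 = (rest.foldl (fun best q =>
        if best.2 < q.2 ∨ (q.2 = best.2 ∧ q.1 < best.1) then q else best) p).2 →
      (rest.foldl (fun best q =>
        if best.2 < q.2 ∨ (q.2 = best.2 ∧ q.1 < best.1) then q else best) p).1 ≤ x.1) := by
  induction rest generalizing p with
  | nil => refine ⟨List.mem_singleton.mpr rfl, ?_, ?_⟩ <;> simp
  | cons q t ih =>
    rw [List.foldl_cons]
    by_cases h : p.2 < q.2 ∨ (q.2 = p.2 ∧ q.1 < p.1)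
    · rw [if_pos h]
      obtain ⟨hm, hmax, hmin⟩ := ih q
      refine ⟨?_, ?_, ?_⟩
      · rcases List.mem_cons.mp hm with h1 | h1
        · rw [h1]; exact List.mem_cons_of_mem _ List.mem_cons_self
        · exact List.mem_cons_of_mem _ (List.mem_cons_of_mem _ h1)
      · intro x hx
        rcases List.mem_cons.mp hx with h1 | h1
        · subst h1
          have hq : x.2 ≤ q.2 := by rcases h with h | ⟨h, _⟩ <;> omega
          exact le_trans hq (hmax q List.mem_cons_self)
        · exact hmax x h1
      · intro x hx hx2
        rcases List.mem_cons.mp hx with h1 | h1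
        · subst h1
          have hq2 : q.2 ≤ (t.foldl (fun best q =>
              if best.2 < q.2 ∨ (q.2 = best.2 ∧ q.1 < best.1) then q else best) q).2 :=
            hmax q List.mem_cons_self
          have hx2' : x.2 ≤ q.2 := by rcases h with h | ⟨h, _⟩ <;> omega
          have hq2' : q.2 = (t.foldl (fun best q =>
              if best.2 < q.2 ∨ (q.2 = best.2 ∧ q.1 < best.1) then q else best) q).2 := by omega
          have hqk : q.1 < x.1 := by
            rcases h with h | ⟨_, h⟩
            · omega
            · exact h
          exact le_of_lt (lt_of_le_of_lt (hmin q List.mem_cons_self hq2') hqk)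
        · exact hmin x h1 hx2
    · rw [if_neg h]
      push Not at h
      obtain ⟨hnlt, hnk⟩ := h
      obtain ⟨hm, hmax, hmin⟩ := ih p
      refine ⟨?_, ?_, ?_⟩
      · rcases List.mem_cons.mp hm with h1 | h1
        · rw [h1]; exact List.mem_cons_self
        · exact List.mem_cons_of_mem _ (List.mem_cons_of_mem _ h1)
      · intro x hx
        rcases List.mem_cons.mp hx with h1 | h1
        · subst h1; exact hmax x List.mem_cons_self
        · rcases List.mem_cons.mp h1 with h2 | h2
          · subst h2
            exact le_trans hnlt (hmax p List.mem_cons_self)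
          · exact hmax x (List.mem_cons_of_mem _ h2)
      · intro x hx hx2
        rcases List.mem_cons.mp hx with h1 | h1
        · subst h1; exact hmin x List.mem_cons_self hx2
        · rcases List.mem_cons.mp h1 with h2 | h2
          · subst h2
            have hpr : p.2 ≤ (t.foldl (fun best q =>
                if best.2 < q.2 ∨ (q.2 = best.2 ∧ q.1 < best.1) then q else best) p).2 :=
              hmax p List.mem_cons_self
            have hp2 : p.2 = (t.foldl (fun best q =>
                if best.2 < q.2 ∨ (q.2 = best.2 ∧ q.1 < best.1) then q else best) p).2 := by omega
            have hxp2 : x.2 = p.2 := by omega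
            have hpx : p.1 ≤ x.1 := hnk hxp2
            exact le_trans (hmin p List.mem_cons_self hp2) hpx
          · exact hmin x (List.mem_cons_of_mem _ h2) hx2

-- With nodup keys, filtering the keys by "the dict's value at the key is M" is the same as
-- taking the keys of the pairs whose own value is M.
lemma filter_keys (l : List (String × Int)) (h : (l.map Prod.fst).Nodup) (M : Int) :
    (l.map Prod.fst).filter
        (fun k => decide (PySem.Dict.get? (PySem.Dict.mk l) k = some M))
      = (l.filter (fun p => decide (p.2 = M))).map Prod.fst := by
  induction l with
  | nil => simp
  | cons kv t ih =>
    obtain ⟨k, v⟩ := kv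
    simp only [List.map_cons, List.nodup_cons] at h
    obtain ⟨hk, ht⟩ := h
    have hself : PySem.Dict.get? (PySem.Dict.mk ((k, v) :: t)) k = some v := by
      rw [PySem.Dict.get?_mk_cons]; simp
    have hrest : ∀ x ∈ t.map Prod.fst,
        PySem.Dict.get? (PySem.Dict.mk ((k, v) :: t)) x = PySem.Dict.get? (PySem.Dict.mk t) x := by
      intro x hx
      rw [PySem.Dict.get?_mk_cons]
      have : k ≠ x := fun he => hk (he ▸ hx)
      simp [this]
    have hcongr : (t.map Prod.fst).filter
        (fun x => decide (PySem.Dict.get? (PySem.Dict.mk ((k, v) :: t)) x = some M))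
        = (t.map Prod.fst).filter
        (fun x => decide (PySem.Dict.get? (PySem.Dict.mk t) x = some M)) := by
      apply List.filter_congr
      intro x hx
      rw [hrest x hx]
    rw [List.map_cons, List.filter_cons, List.filter_cons]
    have c1 : decide (PySem.Dict.get? (PySem.Dict.mk ((k, v) :: t)) k = some M)
        = decide (v = M) := by simp [hself]
    have c2 : decide ((k, v).2 = M) = decide (v = M) := rfl
    rw [c1, c2, hcongr, ih ht]
    by_cases hv : v = M
    · simp [hv]
    · simp [hv]

-- ===== VERDICT (by name: the statement is the Claim_ definition above) =====
theorem get_richest_person_spec : Claim_equal_get_richest_person := by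
  intro l _ hpre
  obtain ⟨hne, hnd⟩ := hpre
  unfold Spec_get_richest_person
  cases l with
  | nil => exact absurd rfl hne
  | cons p rest =>
    set L := p :: rest with hL
    -- the maximal income exists
    have hvals : PySem.Dict.values (PySem.Dict.mk L) = L.map Prod.snd := rfl
    rcases hmax : PySem.List.max? (PySem.Dict.values (PySem.Dict.mk L)) (fun x => x) with _ | M
    · rw [hvals, PySem.List.max?_eq_none_iff] at hmax
      simp [hL] at hmax
    -- B's accumulator
    obtain ⟨hrmem, hrmax, hrmin⟩ := foldl_best_spec rest p
    set r := rest.foldl (fun best q =>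
        if best.2 < q.2 ∨ (q.2 = best.2 ∧ q.1 < best.1) then q else best) p with hr
    -- A's filtered key list
    have hMmem : M ∈ L.map Prod.snd := by
      have := PySem.List.max?_mem hmax
      rwa [hvals] at this
    have hMmax : ∀ y ∈ L.map Prod.snd, y ≤ M := by
      intro y hy
      have := PySem.List.max?_isMax hmax y (by rwa [hvals])
      exact this
    -- r has income M
    have hr2 : r.2 = M := by
      have h1 : r.2 ≤ M := hMmax r.2 (List.mem_map.mpr ⟨r, hrmem, rfl⟩)
      obtain ⟨q0, hq0mem, hq0⟩ := List.mem_map.mp hMmem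
      have h2 : q0.2 ≤ r.2 := hrmax q0 hq0mem
      omega
    -- A's loop is a filter
    have hkeys : PySem.Dict.keys (PySem.Dict.mk L) = L.map Prod.fst := rfl
    have hloop : (PySem.Dict.keys (PySem.Dict.mk L)).foldl
        (fun acc i =>
          if PySem.Dict.get? (PySem.Dict.mk L) i = some M then acc ++ [i] else acc) []
        = (L.filter (fun q => decide (q.2 = M))).map Prod.fst := by
      rw [hkeys, PySem.List.foldl_append_ite_eq_filter, List.nil_append, filter_keys L hnd M]
    set S := (L.filter (fun q => decide (q.2 = M))).map Prod.fst with hS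
    -- S is nonempty, so the sorted list has a head
    have hSne : S ≠ [] := by
      obtain ⟨q0, hq0mem, hq0⟩ := List.mem_map.mp hMmem
      have : q0.1 ∈ S := List.mem_map.mpr ⟨q0, List.mem_filter.mpr ⟨hq0mem, by simp [hq0]⟩, rfl⟩
      exact List.ne_nil_of_mem this
    rcases hsort : PySem.List.sorted S (fun x => x) false with _ | ⟨k0, t0⟩
    · exact absurd ((PySem.List.sorted_eq_nil_iff S (fun x => x) false).mp hsort) hSne
    have hk0mem : k0 ∈ S := by
      have : k0 ∈ PySem.List.sorted S (fun x => x) false := hsort ▸ List.mem_cons_self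
      exact (PySem.List.mem_sorted S (fun x => x) false k0).mp this
    have hk0min : ∀ y ∈ S, k0 ≤ y := PySem.List.key_head_sorted_le S (fun x => x) hsort
    -- identify both sides
    have hB : get_richest_person_alt L = r.1 := by
      simp only [hL, get_richest_person_alt, hr]
    have hA : get_richest_person L = k0 := by
      unfold get_richest_person
      rw [hmax]
      simp only [hloop, hS]
      rw [hsort]
      simp [PySem.List.pyGet?, PySem.List.pyIdx?]
    rw [hA, hB]
    -- antisymmetry
    have hr1S : r.1 ∈ S :=
      List.mem_map.mpr ⟨r, List.mem_filter.mpr ⟨hrmem, by simp [hr2]⟩, rfl⟩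
    have h1 : k0 ≤ r.1 := hk0min r.1 hr1S
    obtain ⟨p0, hp0mem, hp0⟩ := List.mem_map.mp hk0mem
    have hp0f := List.mem_filter.mp hp0mem
    have hp02 : p0.2 = M := by simpa using hp0f.2
    have h2 : r.1 ≤ k0 := hp0 ▸ hrmin p0 hp0f.1 (by omega)
    exact le_antisymm h1 h2
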